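-- pv_equiv track=rewrite | github.com/AnimeshJaiswal11/leetcode-solutions | leet.py | min_efforts
-- ===== SOURCE A (Python) =====
-- def min_efforts(A,B,X,Y):
--     A.sort()
--     B.sort()
--     i = len(A) - 1
--     eff = 0
--     inhand = 0
--     while i >= 0:
--         if A == B and inhand == 0:
--             break
--         x = A[i] - B[i]
--         if x > 0:
--             eff += Y*x
--             A[i] -= x
--             inhand += x
--         elif x < 0:
--             eff += X*(-x)
--             A[i] += x
--             inhand += x
--         i -= 1
--     return eff
-- ===== SOURCE B (Python) =====
-- def min_efforts(A, B, X, Y):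
--     # Sweep over the merged sorted values with an incremental surplus counter,
--     # charging (gap length) * (weighted counter) per value interval.
--     # Note: unlike the original, this does not sort A and B in place.
--     n = len(A)
--     As = sorted(A)
--     Bs = sorted(B)[:n]
--     m = len(Bs)
--     eff = 0
--     d = 0            # (# B-events consumed) - (# A-events consumed)
--     prev = None
--     i = j = 0
--     while i < n or j < m:
--         if j >= m or (i < n and As[i] <= Bs[j]):
--             v = As[i]; i += 1; delta = -1
--         else:
--             v = Bs[j]; j += 1; delta = 1
--         if prev is not None and v > prev:
--             eff += (v - prev) * (Y * d if d > 0 else X * (-d))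
--         d += delta
--         prev = v
--     return eff
-- ===== Notes on version B (the rewrite author's own statement) =====
-- stated objective: alternative
-- what changed: replaces the destructive descending per-index loop (full A==B comparison and in-place writes each iteration) with a two-pointer sweep over the merged sorted values that maintains an incremental surplus counter and charges gap*weighted-counter per value interval
import Mathlib
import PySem

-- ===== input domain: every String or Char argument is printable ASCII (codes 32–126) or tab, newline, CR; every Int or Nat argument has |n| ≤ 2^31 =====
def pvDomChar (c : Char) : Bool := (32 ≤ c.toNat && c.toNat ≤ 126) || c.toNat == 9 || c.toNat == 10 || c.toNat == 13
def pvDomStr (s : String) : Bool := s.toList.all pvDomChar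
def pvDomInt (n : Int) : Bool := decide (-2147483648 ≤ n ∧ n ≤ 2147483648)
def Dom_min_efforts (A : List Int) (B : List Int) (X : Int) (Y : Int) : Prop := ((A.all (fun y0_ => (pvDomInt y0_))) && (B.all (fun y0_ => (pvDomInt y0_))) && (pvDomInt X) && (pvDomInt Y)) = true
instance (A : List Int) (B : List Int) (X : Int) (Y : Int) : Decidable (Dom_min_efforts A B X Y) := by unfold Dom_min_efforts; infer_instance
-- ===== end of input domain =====

-- B replaces A's destructive descending per-index loop (with a full A==B list comparison
-- each iteration) by a two-pointer sweep over the merged sorted values that maintains an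
-- incremental surplus counter and charges gap*weighted-counter per value interval
-- (objective: alternative algorithm). Equivalence is about the RETURN value only: the
-- Python A sorts A and B in place, B does not mutate its arguments.

-- ===== PORT A =====
-- A's while-loop: state (A, eff, inhand), counter n = i + 1; A[i] mutations become List.set.
-- pyGet? returning none is Python's IndexError (len(B) < len(A)), excluded by Pre_.
def minEffortsLoop (B : List Int) (X : Int) (Y : Int) : List Int → Int → Int → Nat → Int
  | _, eff, _, 0 => eff
  | A, eff, inhand, n+1 =>
    if A = B ∧ inhand = 0 then eff
    else
      match PySem.List.pyGet? A (n : Int), PySem.List.pyGet? B (n : Int) with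
      | some a, some b =>
        let x := a - b
        if x > 0 then minEffortsLoop B X Y (A.set n (a - x)) (eff + Y * x) (inhand + x) n
        else if x < 0 then minEffortsLoop B X Y (A.set n (a + x)) (eff + X * (-x)) (inhand + x) n
        else minEffortsLoop B X Y A eff inhand n
      | _, _ => eff

def min_efforts (A : List Int) (B : List Int) (X : Int) (Y : Int) : Int :=
  let sA := PySem.List.sorted A (fun x => x) false
  let sB := PySem.List.sorted B (fun x => x) false
  minEffortsLoop sB X Y sA 0 0 sA.length

-- ===== PORT B =====
-- the interval charge of Source B's loop body: (v - prev) * (Y*d if d > 0 else X*(-d)) when v > prev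
def sweepGap (X Y : Int) (prev : Option Int) (v : Int) (d : Int) : Int :=
  match prev with
  | none => 0
  | some p => if v > p then (v - p) * (if d > 0 then Y * d else X * (-d)) else 0

-- Source B's while loop over indices i,j: ported as recursion on the remaining suffixes of As, Bs
def sweep (X Y : Int) : List Int → List Int → Int → Option Int → Int → Int
  | [], [], _, _, eff => eff
  | [], b :: bt, d, prev, eff => sweep X Y [] bt (d + 1) (some b) (eff + sweepGap X Y prev b d)
  | a :: at_, [], d, prev, eff => sweep X Y at_ [] (d - 1) (some a) (eff + sweepGap X Y prev a d)
  | a :: at_, b :: bt, d, prev, eff =>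
    if a ≤ b then sweep X Y at_ (b :: bt) (d - 1) (some a) (eff + sweepGap X Y prev a d)
    else sweep X Y (a :: at_) bt (d + 1) (some b) (eff + sweepGap X Y prev b d)
  termination_by as bs _ _ _ => as.length + bs.length

def min_efforts_alt (A : List Int) (B : List Int) (X : Int) (Y : Int) : Int :=
  let As := PySem.List.sorted A (fun x => x) false
  let Bs := (PySem.List.sorted B (fun x => x) false).take A.length  -- sorted(B)[:n], n = len(A) ≥ 0
  sweep X Y As Bs 0 none 0

-- ===== PRECONDITION & SPEC =====
-- Pre_ excludes exactly the inputs where A raises IndexError: with len(A) > len(B) the first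
-- iteration reads B[len(A)-1], which is out of range.
def Pre_min_efforts (A : List Int) (B : List Int) (X : Int) (Y : Int) : Prop :=
  A.length ≤ B.length
instance (A : List Int) (B : List Int) (X : Int) (Y : Int) : Decidable (Pre_min_efforts A B X Y) := by unfold Pre_min_efforts; infer_instance

def pvWitness_min_efforts : List Int × List Int × Int × Int := ([1, 2], [0, 3], 2, 3)

def Spec_min_efforts (A : List Int) (B : List Int) (X : Int) (Y : Int) (out : Int) : Prop := out = min_efforts_alt A B X Y
instance (A : List Int) (B : List Int) (X : Int) (Y : Int) (out : Int) : Decidable (Spec_min_efforts A B X Y out) := by unfold Spec_min_efforts; infer_instance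

-- ===== CLAIM (what is proved, stated in full; the proofs are below) =====
def Claim_equal_min_efforts : Prop := ∀ (A : List Int) (B : List Int) (X : Int) (Y : Int), Dom_min_efforts A B X Y → Pre_min_efforts A B X Y → Spec_min_efforts A B X Y (min_efforts A B X Y)

-- ===== LEMMAS AND PROOFS =====

-- the per-index cost of pair (a, b)
def effCost (X : Int) (Y : Int) (p : Int × Int) : Int :=
  if p.1 > p.2 then Y * (p.1 - p.2) else X * (p.2 - p.1)

theorem map_effCost_zip_self (X Y : Int) (A : List Int) :
    (A.zip A).map (effCost X Y) = List.replicate A.length 0 := by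
  induction A with
  | nil => rfl
  | cons a t ih =>
    simp only [List.zip_cons_cons, List.map_cons, List.length_cons, List.replicate_succ, ih,
      effCost]
    simp

theorem take_zip_set (A B : List Int) (n : Nat) (v : Int) :
    ((A.set n v).zip B).take n = (A.zip B).take n := by
  simp only [List.zip, List.take_zipWith]
  rw [List.take_set, List.set_eq_of_length_le (by simp)]

theorem minEffortsLoop_eq_sum (B : List Int) (X Y : Int) :
    ∀ (n : Nat) (A : List Int) (eff inhand : Int), n ≤ A.length → A.length ≤ B.length →
      minEffortsLoop B X Y A eff inhand n
        = eff + (((A.zip B).take n).map (effCost X Y)).sum := by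
  intro n
  induction n with
  | zero => intro A eff inhand _ _; simp [minEffortsLoop]
  | succ n ih =>
    intro A eff inhand hn hAB
    have hnA : n < A.length := by omega
    have hnB : n < B.length := by omega
    rw [minEffortsLoop]
    by_cases hbr : A = B ∧ inhand = 0
    · rw [if_pos hbr]
      obtain ⟨hAB', hin⟩ := hbr
      subst hAB'
      rw [List.map_take, map_effCost_zip_self, List.take_replicate, List.sum_replicate]
      simp
    · rw [if_neg hbr]
      have hA : PySem.List.pyGet? A (n : Int) = some A[n] := by
        rw [PySem.List.pyGet?_natCast, List.getElem?_eq_getElem hnA]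
      have hB : PySem.List.pyGet? B (n : Int) = some B[n] := by
        rw [PySem.List.pyGet?_natCast, List.getElem?_eq_getElem hnB]
      rw [hA, hB]
      have hzlen : n < (A.zip B).length := by simp [hnA, hnB]
      have htake : ((A.zip B).take (n+1)).map (effCost X Y)
          = ((A.zip B).take n).map (effCost X Y) ++ [effCost X Y (A[n], B[n])] := by
        rw [List.take_add_one, List.getElem?_eq_getElem hzlen]
        simp
      simp only []
      by_cases hx : A[n] - B[n] > 0
      · rw [if_pos hx,
          ih (A.set n (A[n] - (A[n] - B[n]))) _ _ (by simp; omega) (by simp [hAB]),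
          take_zip_set, htake]
        simp only [List.sum_append, List.sum_cons, List.sum_nil, effCost]
        rw [if_pos (by omega : A[n] > B[n])]
        ring
      · rw [if_neg hx]
        by_cases hx2 : A[n] - B[n] < 0
        · rw [if_pos hx2,
            ih (A.set n (A[n] + (A[n] - B[n]))) _ _ (by simp; omega) (by simp [hAB]),
            take_zip_set, htake]
          simp only [List.sum_append, List.sum_cons, List.sum_nil, effCost]
          rw [if_neg (by omega : ¬ A[n] > B[n])]
          ring
        · rw [if_neg hx2, ih A _ _ (by omega) hAB, htake]
          simp only [List.sum_append, List.sum_cons, List.sum_nil, effCost]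
          have : A[n] = B[n] := by omega
          rw [if_neg (by omega : ¬ A[n] > B[n]), this]
          ring

-- ---- B side: the sweep computes the same sum ----

-- number (as an Int) of elements ≤ t
def cntLe (t : Int) (l : List Int) : Int := (l.countP (fun x => decide (x ≤ t)) : Int)

-- the local weighted surplus at threshold t, for remaining lists as bs and carried counter d
def locW (X Y d : Int) (as_ bs : List Int) (t : Int) : Int :=
  if d + cntLe t bs - cntLe t as_ > 0 then Y * (d + cntLe t bs - cntLe t as_)
  else X * (-(d + cntLe t bs - cntLe t as_))

theorem cntLe_nil (t : Int) : cntLe t [] = 0 := rfl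

theorem cntLe_cons (t a : Int) (l : List Int) :
    cntLe t (a :: l) = (if a ≤ t then 1 else 0) + cntLe t l := by
  simp only [cntLe, List.countP_cons]
  by_cases h : a ≤ t <;> simp [h] <;> omega

theorem cntLe_eq_zero (t : Int) (l : List Int) (h : ∀ x ∈ l, t < x) : cntLe t l = 0 := by
  have : l.countP (fun x => decide (x ≤ t)) = 0 := by
    rw [List.countP_eq_zero]
    intro x hx
    simpa using not_le.mpr (h x hx)
  simp [cntLe, this]

theorem cntLe_nonneg (t : Int) (l : List Int) : 0 ≤ cntLe t l := by
  simp [cntLe]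

-- on an interval below every remaining element, locW is the constant carried weight
theorem locW_const (X Y d : Int) (as_ bs : List Int) (t : Int)
    (hca : cntLe t as_ = 0) (hcb : cntLe t bs = 0) :
    locW X Y d as_ bs t = (if d > 0 then Y * d else X * (-d)) := by
  simp [locW, hca, hcb]

theorem ge_head_all (v a : Int) (l : List Int) (hva : v ≤ a) (h : ∀ x ∈ l, a ≤ x) :
    ∀ x ∈ a :: l, v ≤ x := by
  intro x hx
  rcases List.mem_cons.mp hx with h' | h'
  · omega
  · have := h x h'
    omega

-- splitting off the gap [p, v): all remaining elements are ≥ v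
theorem sum_locW_gap (X Y M d p v : Int) (as_ bs : List Int)
    (hpv : p ≤ v) (hvM : v ≤ M)
    (hva : ∀ x ∈ as_, v ≤ x) (hvb : ∀ x ∈ bs, v ≤ x) :
    (∑ t ∈ Finset.Ico p M, locW X Y d as_ bs t)
      = sweepGap X Y (some p) v d + ∑ t ∈ Finset.Ico v M, locW X Y d as_ bs t := by
  rw [← Finset.Ico_union_Ico_eq_Ico hpv hvM,
    Finset.sum_union (Finset.Ico_disjoint_Ico_consecutive p v M)]
  have hconst : ∀ t ∈ Finset.Ico p v, locW X Y d as_ bs t = (if d > 0 then Y * d else X * (-d)) := by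
    intro t ht
    rw [Finset.mem_Ico] at ht
    exact locW_const X Y d as_ bs t
      (cntLe_eq_zero _ _ (fun x hx => lt_of_lt_of_le ht.2 (hva x hx)))
      (cntLe_eq_zero _ _ (fun x hx => lt_of_lt_of_le ht.2 (hvb x hx)))
  rw [Finset.sum_congr rfl hconst, Finset.sum_const, Int.card_Ico, nsmul_eq_mul]
  have hcast : ((v - p).toNat : Int) = v - p := Int.toNat_of_nonneg (by omega)
  rw [hcast]
  simp only [sweepGap]
  by_cases hvp : v > p
  · rw [if_pos hvp]
  · have : v = p := by omega
    subst this
    simp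

-- absorbing the consumed head into the carried counter, pointwise for t ≥ the head
theorem locW_consumeA (X Y d : Int) (a t : Int) (at_ bs : List Int) (hat : a ≤ t) :
    locW X Y d (a :: at_) bs t = locW X Y (d - 1) at_ bs t := by
  unfold locW
  rw [cntLe_cons, if_pos hat]
  ring_nf

theorem locW_consumeB (X Y d : Int) (b t : Int) (as_ bt : List Int) (hbt : b ≤ t) :
    locW X Y d as_ (b :: bt) t = locW X Y (d + 1) as_ bt t := by
  unfold locW
  rw [cntLe_cons, if_pos hbt]
  ring_nf

theorem sweep_eq_sum (X Y M : Int) :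
    ∀ (n : Nat) (as_ bs : List Int) (d p eff : Int), as_.length + bs.length = n →
      as_.Pairwise (· ≤ ·) → bs.Pairwise (· ≤ ·) →
      (∀ x ∈ as_, p ≤ x ∧ x ≤ M) → (∀ x ∈ bs, p ≤ x ∧ x ≤ M) →
      d = (as_.length : Int) - bs.length →
      sweep X Y as_ bs d (some p) eff
        = eff + ∑ t ∈ Finset.Ico p M, locW X Y d as_ bs t := by
  intro n
  induction n with
  | zero =>
    intro as_ bs d p eff hn _ _ _ _ hd
    have ha : as_ = [] := by cases as_ <;> simp_all
    have hb : bs = [] := by cases bs <;> simp_all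
    subst ha; subst hb
    have hd0 : d = 0 := by simpa using hd
    subst hd0
    rw [sweep]
    have : ∀ t ∈ Finset.Ico p M, locW X Y 0 [] [] t = 0 := by
      intro t _
      simp [locW, cntLe_nil]
    rw [Finset.sum_congr rfl this, Finset.sum_const_zero]
    ring
  | succ n ih =>
    intro as_ bs d p eff hn ha hb hpa hpb hd
    have stepA : ∀ (a : Int) (at_ : List Int), as_ = a :: at_ →
        (∀ x ∈ bs, a ≤ x) →
        eff + (sweepGap X Y (some p) a d + ∑ t ∈ Finset.Ico a M, locW X Y (d - 1) at_ bs t)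
          = eff + ∑ t ∈ Finset.Ico p M, locW X Y d as_ bs t := by
      intro a at_ hEq hab
      subst hEq
      have hpaa := hpa a (by simp)
      have haat : ∀ x ∈ at_, a ≤ x := fun x hx => (List.pairwise_cons.mp ha).1 x hx
      rw [sum_locW_gap X Y M d p a (a :: at_) bs hpaa.1 hpaa.2
        (ge_head_all a a at_ le_rfl haat) hab]
      have hcg : ∀ t ∈ Finset.Ico a M, locW X Y d (a :: at_) bs t = locW X Y (d - 1) at_ bs t := by
        intro t ht
        exact locW_consumeA X Y d a t at_ bs (Finset.mem_Ico.mp ht).1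
      rw [Finset.sum_congr rfl hcg]
    have stepB : ∀ (b : Int) (bt : List Int), bs = b :: bt →
        (∀ x ∈ as_, b ≤ x) →
        eff + (sweepGap X Y (some p) b d + ∑ t ∈ Finset.Ico b M, locW X Y (d + 1) as_ bt t)
          = eff + ∑ t ∈ Finset.Ico p M, locW X Y d as_ bs t := by
      intro b bt hEq hba
      subst hEq
      have hpbb := hpb b (by simp)
      have hbbt : ∀ x ∈ bt, b ≤ x := fun x hx => (List.pairwise_cons.mp hb).1 x hx
      rw [sum_locW_gap X Y M d p b as_ (b :: bt) hpbb.1 hpbb.2 hba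
        (ge_head_all b b bt le_rfl hbbt)]
      have hcg : ∀ t ∈ Finset.Ico b M, locW X Y d as_ (b :: bt) t = locW X Y (d + 1) as_ bt t := by
        intro t ht
        exact locW_consumeB X Y d b t as_ bt (Finset.mem_Ico.mp ht).1
      rw [Finset.sum_congr rfl hcg]
    match as_, bs with
    | [], [] => simp at hn
    | [], b :: bt =>
      rw [sweep]
      rw [ih [] bt (d + 1) b (eff + sweepGap X Y (some p) b d) (by simp at hn ⊢; omega)
        (by simp) (List.pairwise_cons.mp hb).2 (by simp)
        (fun x hx => ⟨(List.pairwise_cons.mp hb).1 x hx, (hpb x (by simp [hx])).2⟩)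
        (by simp at hd ⊢; omega)]
      rw [add_assoc]
      exact stepB b bt rfl (by simp)
    | a :: at_, [] =>
      rw [sweep]
      rw [ih at_ [] (d - 1) a (eff + sweepGap X Y (some p) a d) (by simp at hn ⊢; omega)
        (List.pairwise_cons.mp ha).2 (by simp)
        (fun x hx => ⟨(List.pairwise_cons.mp ha).1 x hx, (hpa x (by simp [hx])).2⟩)
        (by simp) (by simp at hd ⊢; omega)]
      rw [add_assoc]
      exact stepA a at_ rfl (by simp)
    | a :: at_, b :: bt =>
      rw [sweep]
      have haat : ∀ x ∈ at_, a ≤ x := fun x hx => (List.pairwise_cons.mp ha).1 x hx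
      have hbbt : ∀ x ∈ bt, b ≤ x := fun x hx => (List.pairwise_cons.mp hb).1 x hx
      by_cases hab : a ≤ b
      · rw [if_pos hab]
        rw [ih at_ (b :: bt) (d - 1) a (eff + sweepGap X Y (some p) a d) (by simp at hn ⊢; omega)
          (List.pairwise_cons.mp ha).2 hb
          (fun x hx => ⟨(List.pairwise_cons.mp ha).1 x hx, (hpa x (by simp [hx])).2⟩)
          (fun x hx => ⟨ge_head_all a b bt hab hbbt x hx, (hpb x hx).2⟩)
          (by simp at hd ⊢; omega)]
        rw [add_assoc]
        exact stepA a at_ rfl (ge_head_all a b bt hab hbbt)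
      · rw [if_neg hab]
        rw [ih (a :: at_) bt (d + 1) b (eff + sweepGap X Y (some p) b d) (by simp at hn ⊢; omega)
          ha (List.pairwise_cons.mp hb).2
          (fun x hx => ⟨ge_head_all b a at_ (by omega) haat x hx, (hpa x hx).2⟩)
          (fun x hx => ⟨(List.pairwise_cons.mp hb).1 x hx, (hpb x (by simp [hx])).2⟩)
          (by simp at hd ⊢; omega)]
        rw [add_assoc]
        exact stepB b bt rfl (ge_head_all b a at_ (by omega) haat)

-- ---- counting: at each threshold t, the number of mismatched pairs is the count surplus ----

theorem count_pairs (t : Int) :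
    ∀ (xs ys : List Int), xs.Pairwise (· ≤ ·) → ys.Pairwise (· ≤ ·) → xs.length = ys.length →
      ((xs.zip ys).map (fun pr => if pr.2 ≤ t ∧ t < pr.1 then (1 : Int) else 0)).sum
        = max (cntLe t ys - cntLe t xs) 0 := by
  intro xs
  induction xs with
  | nil =>
    intro ys _ _ hlen
    have : ys = [] := by cases ys <;> simp_all
    subst this
    simp [cntLe_nil]
  | cons a at_ ih =>
    intro ys ha hy hlen
    match ys with
    | [] => simp at hlen
    | b :: bt =>
      have haat : ∀ x ∈ at_, a ≤ x := fun x hx => (List.pairwise_cons.mp ha).1 x hx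
      have hbbt : ∀ x ∈ bt, b ≤ x := fun x hx => (List.pairwise_cons.mp hy).1 x hx
      rw [List.zip_cons_cons, List.map_cons, List.sum_cons,
        ih bt (List.pairwise_cons.mp ha).2 (List.pairwise_cons.mp hy).2 (by simp at hlen; omega),
        cntLe_cons, cntLe_cons]
      have hA' := cntLe_nonneg t at_
      have hB' := cntLe_nonneg t bt
      by_cases hbt : b ≤ t
      · by_cases hat : a ≤ t
        · rw [if_neg (by omega), if_pos hbt, if_pos hat]
          omega
        · have hA0 : cntLe t at_ = 0 :=
            cntLe_eq_zero t at_ (fun x hx => by have := haat x hx; omega)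
          rw [if_pos ⟨hbt, by omega⟩, if_pos hbt, if_neg hat, hA0]
          omega
      · have hB0 : cntLe t bt = 0 :=
          cntLe_eq_zero t bt (fun x hx => by have := hbbt x hx; omega)
        rw [if_neg (by tauto), if_neg hbt, hB0]
        by_cases hat : a ≤ t <;> [rw [if_pos hat]; rw [if_neg hat]] <;> omega

-- ---- per pair: the mismatch indicator summed over all thresholds is the positive gap ----

theorem sum_indicator_Ico (p M a b : Int) (hpb : p ≤ b) (haM : a ≤ M) :
    (∑ t ∈ Finset.Ico p M, if b ≤ t ∧ t < a then (1 : Int) else 0) = max (a - b) 0 := by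
  rw [Finset.sum_boole]
  have hfil : {x ∈ Finset.Ico p M | b ≤ x ∧ x < a} = Finset.Ico b a := by
    ext x
    simp only [Finset.mem_filter, Finset.mem_Ico]
    omega
  rw [hfil, Int.card_Ico]
  omega

-- ---- exchanging a list sum with a Finset sum ----

theorem list_finset_sum_comm {α : Type} (l : List α) (S : Finset Int) (f : α → Int → Int) :
    (l.map (fun x => ∑ t ∈ S, f x t)).sum = ∑ t ∈ S, (l.map (fun x => f x t)).sum := by
  induction l with
  | nil => simp
  | cons x l ih => simp [ih, Finset.sum_add_distrib]

theorem sum_map_add_ {α : Type} (l : List α) (u v : α → Int) :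
    (l.map (fun x => u x + v x)).sum = (l.map u).sum + (l.map v).sum := by
  induction l with
  | nil => simp
  | cons x l ih => simp [ih]; ring

theorem sum_map_mul_left_ {α : Type} (l : List α) (c : Int) (u : α → Int) :
    (l.map (fun x => c * u x)).sum = c * (l.map u).sum := by
  induction l with
  | nil => simp
  | cons x l ih => simp [ih]; ring

-- ---- the threshold sum of the weighted surplus equals the zipped cost sum ----

theorem sum_locW_eq_zipSum (X Y p M : Int) (as_ bs : List Int)
    (ha : as_.Pairwise (· ≤ ·)) (hb : bs.Pairwise (· ≤ ·)) (hlen : as_.length = bs.length)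
    (hpa : ∀ x ∈ as_, p ≤ x ∧ x ≤ M) (hpb : ∀ x ∈ bs, p ≤ x ∧ x ≤ M) :
    (∑ t ∈ Finset.Ico p M, locW X Y 0 as_ bs t) = ((as_.zip bs).map (effCost X Y)).sum := by
  have hpair : ∀ pr ∈ as_.zip bs, effCost X Y pr
      = ∑ t ∈ Finset.Ico p M,
          (Y * (if pr.2 ≤ t ∧ t < pr.1 then (1 : Int) else 0)
            + X * (if pr.1 ≤ t ∧ t < pr.2 then (1 : Int) else 0)) := by
    intro pr hpr
    obtain ⟨h1, h2⟩ := List.of_mem_zip hpr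
    rw [Finset.sum_add_distrib, ← Finset.mul_sum, ← Finset.mul_sum,
      sum_indicator_Ico p M pr.1 pr.2 (hpb pr.2 h2).1 (hpa pr.1 h1).2,
      sum_indicator_Ico p M pr.2 pr.1 (hpa pr.1 h1).1 (hpb pr.2 h2).2]
    unfold effCost
    by_cases h : pr.1 > pr.2
    · rw [if_pos h, (by omega : max (pr.1 - pr.2) 0 = pr.1 - pr.2),
        (by omega : max (pr.2 - pr.1) 0 = 0)]
      ring
    · rw [if_neg h, (by omega : max (pr.1 - pr.2) 0 = 0),
        (by omega : max (pr.2 - pr.1) 0 = pr.2 - pr.1)]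
      ring
  rw [List.map_congr_left hpair, list_finset_sum_comm]
  refine Finset.sum_congr rfl (fun t _ => ?_)
  rw [sum_map_add_, sum_map_mul_left_, sum_map_mul_left_,
    count_pairs t as_ bs ha hb hlen]
  have hswap : ((as_.zip bs).map (fun pr => if pr.1 ≤ t ∧ t < pr.2 then (1 : Int) else 0)).sum
      = max (cntLe t as_ - cntLe t bs) 0 := by
    rw [← count_pairs t bs as_ hb ha hlen.symm, ← List.zip_swap bs as_, List.map_map]
    rfl
  rw [hswap]
  unfold locW
  by_cases hd : 0 + cntLe t bs - cntLe t as_ > 0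
  · rw [if_pos hd, (by omega : max (cntLe t bs - cntLe t as_) 0 = cntLe t bs - cntLe t as_),
      (by omega : max (cntLe t as_ - cntLe t bs) 0 = 0)]
    ring
  · rw [if_neg hd, (by omega : max (cntLe t bs - cntLe t as_) 0 = 0),
      (by omega : max (cntLe t as_ - cntLe t bs) 0 = cntLe t as_ - cntLe t bs)]
    ring

-- zipping against a list truncated at the zip's natural length changes nothing
theorem zip_take_self {α : Type} : ∀ (as_ bs : List α), as_.zip (bs.take as_.length) = as_.zip bs := by
  intro as_
  induction as_ with
  | nil => intro bs; simp
  | cons a at_ ih =>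
    intro bs
    cases bs with
    | nil => simp
    | cons b bt => simp [ih]

theorem le_foldr_max (l : List Int) (init : Int) :
    init ≤ l.foldr max init ∧ ∀ x ∈ l, x ≤ l.foldr max init := by
  induction l with
  | nil => simp
  | cons a t ih =>
    refine ⟨le_trans ih.1 (le_max_right a _), ?_⟩
    intro x hx
    rcases List.mem_cons.mp hx with h | h
    · subst h
      exact le_max_left _ _
    · exact le_trans (ih.2 x h) (le_max_right _ _)

-- the initial (prev = None) step of the sweep, then the threshold-sum bridge
theorem sweep_eq_zipSum (X Y : Int) (as_ bs : List Int)
    (ha : as_.Pairwise (· ≤ ·)) (hb : bs.Pairwise (· ≤ ·)) (hlen : as_.length = bs.length) :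
    sweep X Y as_ bs 0 none 0 = ((as_.zip bs).map (effCost X Y)).sum := by
  match as_, bs with
  | [], [] => rw [sweep]; rfl
  | [], b :: bt => simp at hlen
  | a :: at_, [] => simp at hlen
  | a :: at_, b :: bt =>
    have haat : ∀ x ∈ at_, a ≤ x := fun x hx => (List.pairwise_cons.mp ha).1 x hx
    have hbbt : ∀ x ∈ bt, b ≤ x := fun x hx => (List.pairwise_cons.mp hb).1 x hx
    have hM := le_foldr_max ((a :: at_) ++ (b :: bt)) a
    have hMa : ∀ x ∈ a :: at_, x ≤ ((a :: at_) ++ (b :: bt)).foldr max a :=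
      fun x hx => hM.2 x (List.mem_append_left _ hx)
    have hMb : ∀ x ∈ b :: bt, x ≤ ((a :: at_) ++ (b :: bt)).foldr max a :=
      fun x hx => hM.2 x (List.mem_append_right _ hx)
    rw [sweep]
    by_cases hab : a ≤ b
    · have hge : ∀ x ∈ b :: bt, a ≤ x := ge_head_all a b bt hab hbbt
      rw [if_pos hab,
        sweep_eq_sum X Y (((a :: at_) ++ (b :: bt)).foldr max a)
          (at_.length + (b :: bt).length) at_ (b :: bt) (0 - 1) a
          (0 + sweepGap X Y none a 0) rfl
          (List.pairwise_cons.mp ha).2 hb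
          (fun x hx => ⟨haat x hx, hMa x (List.mem_cons_of_mem a hx)⟩)
          (fun x hx => ⟨hge x hx, hMb x hx⟩)
          (by simp at hlen ⊢; omega)]
      have hcg : ∀ t ∈ Finset.Ico a (((a :: at_) ++ (b :: bt)).foldr max a),
          locW X Y (0 - 1) at_ (b :: bt) t = locW X Y 0 (a :: at_) (b :: bt) t :=
        fun t ht => (locW_consumeA X Y 0 a t at_ (b :: bt) (Finset.mem_Ico.mp ht).1).symm
      rw [Finset.sum_congr rfl hcg,
        sum_locW_eq_zipSum X Y a (((a :: at_) ++ (b :: bt)).foldr max a) (a :: at_) (b :: bt)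
          ha hb hlen
          (fun x hx => ⟨ge_head_all a a at_ le_rfl haat x hx, hMa x hx⟩)
          (fun x hx => ⟨hge x hx, hMb x hx⟩)]
      have : sweepGap X Y none a 0 = 0 := rfl
      rw [this]
      ring
    · have hge : ∀ x ∈ a :: at_, b ≤ x := ge_head_all b a at_ (by omega) haat
      rw [if_neg hab,
        sweep_eq_sum X Y (((a :: at_) ++ (b :: bt)).foldr max a)
          ((a :: at_).length + bt.length) (a :: at_) bt (0 + 1) b
          (0 + sweepGap X Y none b 0) rfl
          ha (List.pairwise_cons.mp hb).2
          (fun x hx => ⟨hge x hx, hMa x hx⟩)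
          (fun x hx => ⟨hbbt x hx, hMb x (List.mem_cons_of_mem b hx)⟩)
          (by simp at hlen ⊢; omega)]
      have hcg : ∀ t ∈ Finset.Ico b (((a :: at_) ++ (b :: bt)).foldr max a),
          locW X Y (0 + 1) (a :: at_) bt t = locW X Y 0 (a :: at_) (b :: bt) t :=
        fun t ht => (locW_consumeB X Y 0 b t (a :: at_) bt (Finset.mem_Ico.mp ht).1).symm
      rw [Finset.sum_congr rfl hcg,
        sum_locW_eq_zipSum X Y b (((a :: at_) ++ (b :: bt)).foldr max a) (a :: at_) (b :: bt)
          ha hb hlen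
          (fun x hx => ⟨hge x hx, hMa x hx⟩)
          (fun x hx => ⟨ge_head_all b b bt le_rfl hbbt x hx, hMb x hx⟩)]
      have : sweepGap X Y none b 0 = 0 := rfl
      rw [this]
      ring

-- ===== VERDICT (by name: the statement is the Claim_ definition above) =====
theorem min_efforts_spec : Claim_equal_min_efforts := by
  intro A B X Y _ hpre
  unfold Spec_min_efforts min_efforts min_efforts_alt
  have hlA : (PySem.List.sorted A (fun x => x) false).length = A.length :=
    PySem.List.length_sorted _ _ _
  have hlB : (PySem.List.sorted B (fun x => x) false).length = B.length :=
    PySem.List.length_sorted _ _ _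
  have hpre' : A.length ≤ B.length := hpre
  have hpA : (PySem.List.sorted A (fun x => x) false).Pairwise (· ≤ ·) :=
    PySem.List.sorted_pairwise _ _
  have hpB : (PySem.List.sorted B (fun x => x) false).Pairwise (· ≤ ·) :=
    PySem.List.sorted_pairwise _ _
  have hpBt : ((PySem.List.sorted B (fun x => x) false).take A.length).Pairwise (· ≤ ·) :=
    hpB.sublist (List.take_sublist _ _)
  have hlent : ((PySem.List.sorted B (fun x => x) false).take A.length).length = A.length := by
    rw [List.length_take]
    omega
  rw [minEffortsLoop_eq_sum (PySem.List.sorted B (fun x => x) false) X Y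
      (PySem.List.sorted A (fun x => x) false).length
      (PySem.List.sorted A (fun x => x) false) 0 0 le_rfl (by omega),
    List.take_of_length_le (by rw [List.length_zip]; omega), zero_add,
    sweep_eq_zipSum X Y (PySem.List.sorted A (fun x => x) false)
      ((PySem.List.sorted B (fun x => x) false).take A.length) hpA hpBt (by omega)]
  have hzip : (PySem.List.sorted A (fun x => x) false).zip
        ((PySem.List.sorted B (fun x => x) false).take A.length)
      = (PySem.List.sorted A (fun x => x) false).zip (PySem.List.sorted B (fun x => x) false) := by
    rw [← hlA]
    exact zip_take_self _ _
  rw [hzip]
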